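-- pv_equiv track=rewrite | github.com/Adrianowiedmann/CifraVigenere | code_cifra_vigenere.py | distancia_trigramas
-- ===== SOURCE A (Python) =====
-- def distancia_trigramas(text, list_tri):
--     dict_trigramas = dict()
--     for tri in list_tri:
--         dict_trigramas[tri] = []
--         posicao = text.find(tri)
--         while posicao != -1:
--             dict_trigramas[tri].append(posicao)
--             posicao = text.find(tri, posicao+1)
--
--     distancias = dict()
--     for tri in list_tri:
--         distancias[tri] = []
--         for i in range (len(dict_trigramas[tri])-1):
--             distancias[tri].append(dict_trigramas[tri][i+1]-dict_trigramas[tri][i])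
--
--     return distancias
-- ===== SOURCE B (Python) =====
-- def distancia_trigramas(text, list_tri):
--     n = len(text)
--     # one index per distinct trigram length: substring -> all its positions, built in one pass
--     index = {}
--     for tri in list_tri:
--         L = len(tri)
--         if L not in index:
--             d = {}
--             for i in range(n - L + 1):
--                 d.setdefault(text[i:i+L], []).append(i)
--             index[L] = d
--     out = {}
--     for tri in list_tri:
--         p = index[len(tri)].get(tri, [])
--         out[tri] = [b - a for a, b in zip(p, p[1:])]
--     return out
-- ===== Notes on version B (the rewrite author's own statement) =====
-- stated objective: faster
-- what changed: Instead of running a str.find loop over the whole text for every trigram (O(m*n)), B makes one pass over the text per distinct trigram length, indexing every substring of that length into a dict of position lists, then answers each trigram by a single lookup and computes the gaps with a pairwise zip.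
import Mathlib
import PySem

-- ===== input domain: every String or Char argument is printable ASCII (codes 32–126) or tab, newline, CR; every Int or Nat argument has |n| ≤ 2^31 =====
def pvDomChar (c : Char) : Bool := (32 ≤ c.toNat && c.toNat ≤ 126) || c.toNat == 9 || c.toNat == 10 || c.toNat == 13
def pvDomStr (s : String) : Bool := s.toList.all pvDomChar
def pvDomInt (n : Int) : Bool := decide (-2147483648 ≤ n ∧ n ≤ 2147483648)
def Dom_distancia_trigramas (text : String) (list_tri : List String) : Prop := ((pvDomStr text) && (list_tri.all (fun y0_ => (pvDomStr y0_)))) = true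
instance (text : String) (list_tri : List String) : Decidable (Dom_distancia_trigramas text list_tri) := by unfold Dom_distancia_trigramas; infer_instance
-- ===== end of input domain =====

-- B replaces A's per-trigram str.find scans of the whole text by one indexing pass per distinct
-- trigram length (substring -> positions dict) plus lookups; measurably faster on many trigrams.

-- ===== PORT A =====
-- A's while loop 'posicao = text.find(tri); while posicao != -1: append; posicao = text.find(tri, posicao+1)'.
-- Found positions are strictly increasing indices into text, so |text|+1 iterations bound the loop (fuel);
-- pvFindLoop_eq below shows the fuel never runs out.
def pvFindLoop (t sub : List Char) : Nat → Int → List Int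
  | 0, _ => []
  | fuel+1, pos =>
      if pos = -1 then []
      else pos :: pvFindLoop t sub fuel (PySem.Chars.findFrom t sub (pos+1) none)

-- first loop: dict_trigramas[tri] = [] then the while loop appends into that entry
-- (ported as computing the appended position list, then storing it at tri — the same dict state);
-- second loop: distancias[tri] = []; for i in range(len(..)-1): append(..[i+1]-..[i])
-- (the key is always present after the first loop, so getD's default [] is never read)
def distancia_trigramas (text : String) (list_tri : List String) : List (String × List Int) :=
  let t := text.toList
  let dictTrigramas : PySem.Dict String (List Int) :=
    list_tri.foldl (fun d tri =>
      d.insert tri (pvFindLoop t tri.toList (t.length + 1) (PySem.Chars.find t tri.toList)))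
      PySem.Dict.empty
  let distancias : PySem.Dict String (List Int) :=
    list_tri.foldl (fun d tri =>
      let ps := dictTrigramas.getD tri []
      d.insert tri ((PySem.List.pyRange 0 (PySem.List.len ps - 1) 1).foldl
        (fun acc i => acc ++ [PySem.List.pyGetD ps (i+1) 0 - PySem.List.pyGetD ps i 0]) []))
      PySem.Dict.empty
  distancias.items

-- ===== PORT B =====
-- one pass over the text for length L: d.setdefault(text[i:i+L], []).append(i)
def pvBuildIndex (text : String) (L : Int) : PySem.Dict String (List Int) :=
  (PySem.List.pyRange 0 (PySem.Str.len text - L + 1) 1).foldl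
    (fun d i => d.modify (PySem.Str.slice text (some i) (some (i + L))) [] (· ++ [i]))
    PySem.Dict.empty

def distancia_trigramas_alt (text : String) (list_tri : List String) : List (String × List Int) :=
  let index : PySem.Dict Int (PySem.Dict String (List Int)) :=
    list_tri.foldl (fun ix tri =>
      if ix.contains (PySem.Str.len tri) then ix
      else ix.insert (PySem.Str.len tri) (pvBuildIndex text (PySem.Str.len tri)))
      PySem.Dict.empty
  let out : PySem.Dict String (List Int) :=
    list_tri.foldl (fun d tri =>
      let p := (index.getD (PySem.Str.len tri) PySem.Dict.empty).getD tri []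
      d.insert tri ((p.zip (PySem.List.slice p (some 1) none)).map (fun q => q.2 - q.1)))
      PySem.Dict.empty
  out.items

-- ===== PRECONDITION & SPEC =====
def Spec_distancia_trigramas (text : String) (list_tri : List String) (out : List (String × List Int)) : Prop := out = distancia_trigramas_alt text list_tri
instance (text : String) (list_tri : List String) (out : List (String × List Int)) : Decidable (Spec_distancia_trigramas text list_tri out) := by unfold Spec_distancia_trigramas; infer_instance

-- ===== CLAIM (what is proved, stated in full; the proofs are below) =====
def Claim_equal_distancia_trigramas : Prop := ∀ (text : String) (list_tri : List String), Dom_distancia_trigramas text list_tri → Spec_distancia_trigramas text list_tri (distancia_trigramas text list_tri)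

-- ===== LEMMAS AND PROOFS =====

-- the occurrence positions of sub in t at indices ≥ s (Python's overlapping-find semantics)
def pvOccFrom (t sub : List Char) (s : Nat) : List Nat :=
  (List.range (t.length + 1)).filter (fun i => decide (s ≤ i) && decide (sub <+: t.drop i))

lemma pvOccFrom_top (t sub : List Char) : pvOccFrom t sub (t.length + 1) = [] := by
  unfold pvOccFrom
  rw [List.filter_eq_nil_iff]
  intro i hi
  simp only [List.mem_range] at hi
  simp only [Bool.and_eq_true, decide_eq_true_eq]
  intro h; omega

lemma pvOccFrom_nil (t sub : List Char) (s : Nat) (h : ∀ i, s ≤ i → ¬ sub <+: t.drop i) :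
    pvOccFrom t sub s = [] := by
  unfold pvOccFrom
  rw [List.filter_eq_nil_iff]
  intro i _
  simp only [Bool.and_eq_true, decide_eq_true_eq]
  rintro ⟨hs, hpre⟩
  exact h i hs hpre

lemma pvOccFrom_cons (t sub : List Char) (s p : Nat) (hp : p ≤ t.length) (hsp : s ≤ p)
    (hm : sub <+: t.drop p) (hmin : ∀ i, s ≤ i → i < p → ¬ sub <+: t.drop i) :
    pvOccFrom t sub s = p :: pvOccFrom t sub (p + 1) := by
  unfold pvOccFrom
  have hsplit : t.length + 1 = (p + 1) + (t.length - p) := by omega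
  rw [hsplit, List.range_add, List.range_succ]
  simp only [List.filter_append]
  have h1 : (List.range p).filter (fun i => decide (s ≤ i) && decide (sub <+: t.drop i)) = [] := by
    rw [List.filter_eq_nil_iff]
    intro i hi
    simp only [List.mem_range] at hi
    simp only [Bool.and_eq_true, decide_eq_true_eq]
    rintro ⟨h2, h3⟩
    exact hmin i h2 hi h3
  have h1' : (List.range p).filter (fun i => decide (p + 1 ≤ i) && decide (sub <+: t.drop i)) = [] := by
    rw [List.filter_eq_nil_iff]
    intro i hi
    simp only [List.mem_range] at hi
    simp only [Bool.and_eq_true, decide_eq_true_eq]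
    intro h2; omega
  have h2 : ([p]).filter (fun i => decide (s ≤ i) && decide (sub <+: t.drop i)) = [p] := by
    simp [hsp, hm]
  have h2' : ([p]).filter (fun i => decide (p + 1 ≤ i) && decide (sub <+: t.drop i)) = [] := by
    simp
  have h3 : ∀ i ∈ (List.range (t.length - p)).map (fun x => p + 1 + x),
      (decide (s ≤ i) && decide (sub <+: t.drop i)) = (decide (p + 1 ≤ i) && decide (sub <+: t.drop i)) := by
    intro i hi
    simp only [List.mem_map, List.mem_range] at hi
    obtain ⟨x, _, rfl⟩ := hi
    have : s ≤ p + 1 + x := by omega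
    have : p + 1 ≤ p + 1 + x := by omega
    simp [*]
  rw [List.filter_congr h3] at *
  rw [h1, h1', h2, h2']
  simp

lemma pvFindFrom_past (t sub : List Char) :
    PySem.Chars.findFrom t sub ((t.length : Int) + 1) none = -1 := by
  simp only [PySem.Chars.findFrom]
  split_ifs <;> first | rfl | omega

lemma pvFindLoop_eq (t sub : List Char) :
    ∀ (fuel : Nat) (s : Nat), s ≤ t.length + 1 → (pvOccFrom t sub s).length ≤ fuel →
      pvFindLoop t sub fuel (PySem.Chars.findFrom t sub (s : Int) none) =
        (pvOccFrom t sub s).map (fun i => (i : Int)) := by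
  intro fuel
  induction fuel with
  | zero =>
    intro s hs hlen
    have h0 : pvOccFrom t sub s = [] := List.eq_nil_of_length_eq_zero (by omega)
    rw [h0]
    simp [pvFindLoop]
  | succ fuel ih =>
    intro s hs hlen
    by_cases htop : s = t.length + 1
    · subst htop
      rw [pvOccFrom_top]
      push_cast
      rw [pvFindFrom_past]
      simp [pvFindLoop]
    · have hsle : s ≤ t.length := by omega
      by_cases hneg : PySem.Chars.findFrom t sub (s : Int) none = -1
      · have hno : ¬ sub <:+: t.drop s :=
          (PySem.Chars.findFrom_natCast_eq_neg_one_iff t sub s hsle).mp hneg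
        have hnil : pvOccFrom t sub s = [] := by
          apply pvOccFrom_nil
          intro i hsi hpre
          apply hno
          have : t.drop i = (t.drop s).drop (i - s) := by
            rw [List.drop_drop]; congr 1; omega
          rw [this] at hpre
          exact hpre.isInfix.trans (List.drop_suffix _ _).isInfix
        rw [hnil, hneg]
        simp [pvFindLoop]
      · obtain ⟨hge, hpre, hmin⟩ := PySem.Chars.findFrom_natCast_spec t sub s hsle hneg
        set p := PySem.Chars.findFrom t sub (s : Int) none with hP
        have hple : p.toNat ≤ t.length := by
          by_contra hgt
          rw [not_le] at hgt
          have hdrop : t.drop p.toNat = [] := List.drop_eq_nil_of_le (by omega)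
          have hsubnil : sub = [] := by
            have := List.IsPrefix.length_le hpre
            rw [hdrop] at this
            simpa using List.eq_nil_of_length_eq_zero (by simpa using this)
          have : ¬ sub <+: t.drop t.length := hmin t.length hsle (by omega)
          rw [hsubnil] at this
          exact this (List.nil_prefix)
        have hcons : pvOccFrom t sub s = p.toNat :: pvOccFrom t sub (p.toNat + 1) := by
          apply pvOccFrom_cons t sub s p.toNat hple (by omega) hpre
          intro i h1 h2
          exact hmin i h1 h2
        rw [hcons]
        rw [pvFindLoop]
        rw [if_neg hneg]
        have hcast : (p + 1 : Int) = ((p.toNat + 1 : Nat) : Int) := by omega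
        rw [hcast, ih (p.toNat + 1) (by omega) (by rw [hcons] at hlen; simpa using Nat.lt_succ_iff.mp (by simpa using hlen))]
        simp
        omega

-- A's per-trigram position list is exactly the occurrence list
lemma pvA_positions (t sub : List Char) :
    pvFindLoop t sub (t.length + 1) (PySem.Chars.find t sub) =
      (pvOccFrom t sub 0).map (fun i => (i : Int)) := by
  rw [← PySem.Chars.findFrom_zero]
  have h := pvFindLoop_eq t sub (t.length + 1) 0 (by omega)
    (by
      have := List.length_filter_le (fun i => decide (0 ≤ i) && decide (sub <+: t.drop i)) (List.range (t.length + 1))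
      unfold pvOccFrom
      simpa using this)
  simpa using h

-- text[k:k+len(tri)] == tri  iff  tri is a prefix of text[k:]
lemma pvPredNat (text tri : String) (k : Nat) :
    ((PySem.Str.slice text (some (k : Int)) (some ((k : Int) + PySem.Str.len tri))) == tri) =
      decide (tri.toList <+: text.toList.drop k) := by
  have hslice : (PySem.Str.slice text (some (k : Int)) (some ((k : Int) + PySem.Str.len tri))).toList
      = (text.toList.drop k).take tri.toList.length := by
    rw [PySem.Str.len_eq]
    have h1 : (PySem.Str.slice text (some (k : Int)) (some ((k : Int) + (tri.toList.length : Int)))).toList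
        = PySem.Chars.slice text.toList (some (k : Int)) (some ((k : Int) + (tri.toList.length : Int))) := by
      simp [PySem.Str.slice]
    rw [h1]
    exact PySem.List.slice_natCast_add text.toList k tri.toList.length
  by_cases h : tri.toList <+: text.toList.drop k
  · have heq : PySem.Str.slice text (some (k : Int)) (some ((k : Int) + PySem.Str.len tri)) = tri := by
      apply String.toList_injective
      rw [hslice, (List.prefix_iff_eq_take.mp h).symm]
    rw [heq]
    simp [h]
  · have hne : PySem.Str.slice text (some (k : Int)) (some ((k : Int) + PySem.Str.len tri)) ≠ tri := by
      intro heq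
      exact h (List.prefix_iff_eq_take.mpr (by rw [← hslice, heq]))
    rw [beq_eq_false_iff_ne.mpr hne]
    simp [h]

lemma pvFilter_range_occ (text tri : String) :
    (List.range (((text.toList.length : Int) - (tri.toList.length : Int) + 1).toNat)).filter
        (fun k => decide (tri.toList <+: text.toList.drop k)) =
      pvOccFrom text.toList tri.toList 0 := by
  unfold pvOccFrom
  have hz : ∀ k : Nat, (decide (0 ≤ k) && decide (tri.toList <+: text.toList.drop k)) =
      decide (tri.toList <+: text.toList.drop k) := by intro k; simp
  rw [List.filter_congr (fun k _ => hz k)]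
  set n := text.toList.length
  set Ln := tri.toList.length
  by_cases hle : Ln ≤ n
  · have hM : ((n : Int) - (Ln : Int) + 1).toNat = (n + 1) - Ln := by omega
    rw [hM]
    have hsplit : n + 1 = ((n + 1) - Ln) + Ln := by omega
    conv_rhs => rw [hsplit, List.range_add, List.filter_append]
    have h2 : (List.filter (fun k => decide (tri.toList <+: text.toList.drop k))
        ((List.range Ln).map (fun x => (n + 1 - Ln) + x))) = [] := by
      rw [List.filter_eq_nil_iff]
      intro k hk
      simp only [List.mem_map, List.mem_range] at hk
      obtain ⟨x, hx, rfl⟩ := hk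
      simp only [decide_eq_true_eq]
      intro hpre
      have := List.IsPrefix.length_le hpre
      rw [List.length_drop] at this
      omega
    rw [h2, List.append_nil]
  · have hM : ((n : Int) - (Ln : Int) + 1).toNat ≤ n + 1 := by omega
    have h1 : ∀ (M : Nat), (∀ k < M, ¬ tri.toList <+: text.toList.drop k) →
        (List.range M).filter (fun k => decide (tri.toList <+: text.toList.drop k)) = [] := by
      intro M hM'
      rw [List.filter_eq_nil_iff]
      intro k hk
      simp only [List.mem_range] at hk
      simp only [decide_eq_true_eq]
      exact hM' k hk
    have hnp : ∀ k : Nat, ¬ tri.toList <+: text.toList.drop k := by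
      intro k hpre
      have := List.IsPrefix.length_le hpre
      rw [List.length_drop] at this
      omega
    rw [h1 _ (fun k _ => hnp k), h1 _ (fun k _ => hnp k)]

-- B's index lookup is exactly the occurrence list
lemma pvB_positions (text tri : String) :
    (pvBuildIndex text (PySem.Str.len tri)).getD tri [] =
      (pvOccFrom text.toList tri.toList 0).map (fun i => (i : Int)) := by
  unfold pvBuildIndex
  have hfold : (PySem.List.pyRange 0 (PySem.Str.len text - PySem.Str.len tri + 1) 1).foldl
      (fun d i => d.modify (PySem.Str.slice text (some i) (some (i + PySem.Str.len tri))) [] (· ++ [i]))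
      PySem.Dict.empty
      = ((PySem.List.pyRange 0 (PySem.Str.len text - PySem.Str.len tri + 1) 1).map
          (fun i => (PySem.Str.slice text (some i) (some (i + PySem.Str.len tri)), i))).foldl
        (fun d p => d.modify p.1 [] (· ++ [p.2])) PySem.Dict.empty := by
    rw [List.foldl_map]
  rw [hfold, PySem.Dict.getD_foldl_modify_append]
  rw [PySem.List.pyRange_one]
  simp only [List.map_map, List.filter_map, Function.comp_def, zero_add, sub_zero]
  rw [List.filter_congr (fun k _ => pvPredNat text tri k)]
  rw [PySem.Str.len_eq, PySem.Str.len_eq, pvFilter_range_occ]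
  simp [PySem.Dict.getD_empty, List.map_eq_flatMap]

-- A's gap loop equals B's pairwise zip
lemma pvGaps_eq (ps : List Int) :
    (PySem.List.pyRange 0 (PySem.List.len ps - 1) 1).foldl
        (fun acc i => acc ++ [PySem.List.pyGetD ps (i+1) 0 - PySem.List.pyGetD ps i 0]) [] =
      (ps.zip (PySem.List.slice ps (some 1) none)).map (fun q => q.2 - q.1) := by
  rw [PySem.List.foldl_append_singleton_eq_map, PySem.List.slice_from_one, PySem.List.pyRange_one]
  simp only [PySem.List.len_eq, List.map_map, Function.comp_def, zero_add, sub_zero,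
    List.nil_append]
  apply List.ext_getElem
  · simp only [List.length_map, List.length_range, List.length_zip, List.length_tail]
    omega
  · intro k h1 h2
    simp only [List.length_map, List.length_range] at h1
    have hk1 : k + 1 < ps.length := by omega
    have hk : k < ps.length := by omega
    simp only [List.getElem_map, List.getElem_range, List.getElem_zip, List.getElem_tail]
    have h3 : ((k : Int) + 1) = ((k + 1 : Nat) : Int) := by omega
    rw [h3, PySem.List.pyGetD_natCast, PySem.List.pyGetD_natCast,
      List.getD_eq_getElem ps 0 hk1, List.getD_eq_getElem ps 0 hk]

-- a fold inserting f-of-key values: lookup of a member key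
lemma pvGetD_foldl_insert (l : List String) (f : String → List Int) :
    ∀ (d : PySem.Dict String (List Int)) (k : String),
      (l.foldl (fun d x => d.insert x (f x)) d).getD k [] =
        if k ∈ l then f k else d.getD k [] := by
  induction l with
  | nil => intro d k; simp
  | cons x l ih =>
    intro d k
    rw [List.foldl_cons, ih]
    by_cases hmem : k ∈ l
    · simp [hmem]
    · by_cases hkx : k = x
      · subst hkx
        simp [hmem]
      · simp [hmem, hkx, PySem.Dict.getD_insert]

-- the insert-if-absent fold over keys g tri: lookup of any key
lemma pvGetD_index (g : String → Int) (v : Int → PySem.Dict String (List Int)) (l : List String) :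
    ∀ (ix : PySem.Dict Int (PySem.Dict String (List Int))) (K : Int),
      (l.foldl (fun ix tri =>
          if ix.contains (g tri) then ix
          else ix.insert (g tri) (v (g tri))) ix).getD K PySem.Dict.empty =
        if ix.contains K then ix.getD K PySem.Dict.empty
        else if K ∈ l.map g then v K else PySem.Dict.empty := by
  induction l with
  | nil =>
    intro ix K
    by_cases h : ix.contains K
    · simp [h]
    · simp [h, PySem.Dict.getD_of_not_contains ix PySem.Dict.empty
        (by simpa using h)]
  | cons tri l ih =>
    intro ix K
    rw [List.foldl_cons]
    by_cases hc : ix.contains (g tri)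
    · rw [if_pos hc, ih]
      by_cases hK : ix.contains K
      · simp [hK]
      · have hKne : K ≠ g tri := by
          intro h; rw [h] at hK; exact absurd hc (by simp [hK])
        simp [hK, List.map_cons, hKne]
    · rw [if_neg hc, ih]
      have hc' : ix.contains (g tri) = false := by
        rw [← Bool.not_eq_true]; exact hc
      by_cases hK : K = g tri
      · subst hK
        have h1 : (ix.insert (g tri) (v (g tri))).contains (g tri) = true := by
          rw [PySem.Dict.contains_insert]; simp
        simp [h1, hc']
      · have h1 : (ix.insert (g tri) (v (g tri))).contains K = ix.contains K := by
          rw [PySem.Dict.contains_insert]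
          simp [hK]
        rw [h1]
        by_cases hK2 : ix.contains K
        · simp [hK2, PySem.Dict.getD_insert, hK]
        · simp [hK2, List.map_cons, hK]

lemma pv_main (text : String) (list_tri : List String) :
    distancia_trigramas text list_tri = distancia_trigramas_alt text list_tri := by
  unfold distancia_trigramas distancia_trigramas_alt
  simp only []
  congr 1
  apply PySem.List.foldl_congr_mem
  intro acc tri htri
  congr 1
  -- A's value at tri = B's value at tri
  have hA : (list_tri.foldl (fun d tri =>
        d.insert tri (pvFindLoop text.toList tri.toList (text.toList.length + 1)
          (PySem.Chars.find text.toList tri.toList))) PySem.Dict.empty).getD tri [] =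
      (pvOccFrom text.toList tri.toList 0).map (fun i => (i : Int)) := by
    rw [pvGetD_foldl_insert list_tri
      (fun tri => pvFindLoop text.toList tri.toList (text.toList.length + 1)
        (PySem.Chars.find text.toList tri.toList)) PySem.Dict.empty tri]
    rw [if_pos htri, pvA_positions]
  have hB : ((list_tri.foldl (fun ix tri =>
        if ix.contains (PySem.Str.len tri) then ix
        else ix.insert (PySem.Str.len tri) (pvBuildIndex text (PySem.Str.len tri)))
        PySem.Dict.empty).getD (PySem.Str.len tri) PySem.Dict.empty).getD tri [] =
      (pvOccFrom text.toList tri.toList 0).map (fun i => (i : Int)) := by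
    rw [pvGetD_index PySem.Str.len (pvBuildIndex text) list_tri PySem.Dict.empty (PySem.Str.len tri)]
    rw [if_neg (by simp [PySem.Dict.contains_empty])]
    rw [if_pos (List.mem_map.mpr ⟨tri, htri, rfl⟩)]
    exact pvB_positions text tri
  rw [hA, hB, pvGaps_eq]

-- ===== VERDICT (by name: the statement is the Claim_ definition above) =====
theorem distancia_trigramas_spec : Claim_equal_distancia_trigramas := by
  intro text list_tri _
  unfold Spec_distancia_trigramas
  exact pv_main text list_tri
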